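-- pv_equiv track=rewrite | github.com/ldct/cp | prepbytes/CODEJAM2021/C/C.py | ans_ac
-- ===== SOURCE A (Python) =====
-- def ans_ac(laugh):
--     x=0
--     y=0
--     prev='z'
--     for i in laugh:
--         if( i =="a"or i=="h"):
--             if i!=prev:
--                 x+=1
--             else:
--                 x=1
--             prev=i
--         else:
--             prev='z'
--             x=0
--         if x>y:
--             y=x
--     return y
-- ===== SOURCE B (Python) =====
-- def ans_ac(laugh):
--     n = len(laugh)
--     best = 0
--     i = 0
--     while i < n:
--         if laugh[i] in "ah":
--             j = i + 1
--             while j < n and laugh[j] in "ah" and laugh[j] != laugh[j - 1]: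
--                 j += 1
--             if j - i > best:
--                 best = j - i
--             i = j
--         else:
--             i += 1
--     return best
-- ===== Notes on version B (the rewrite author's own statement) =====
-- stated objective: alternative
-- what changed: Replaces A's per-character state machine (counter x, running max y, prev sentinel) by a two-pointer scan that jumps over whole maximal alternating a/h segments, taking max of segment lengths.
import Mathlib
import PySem

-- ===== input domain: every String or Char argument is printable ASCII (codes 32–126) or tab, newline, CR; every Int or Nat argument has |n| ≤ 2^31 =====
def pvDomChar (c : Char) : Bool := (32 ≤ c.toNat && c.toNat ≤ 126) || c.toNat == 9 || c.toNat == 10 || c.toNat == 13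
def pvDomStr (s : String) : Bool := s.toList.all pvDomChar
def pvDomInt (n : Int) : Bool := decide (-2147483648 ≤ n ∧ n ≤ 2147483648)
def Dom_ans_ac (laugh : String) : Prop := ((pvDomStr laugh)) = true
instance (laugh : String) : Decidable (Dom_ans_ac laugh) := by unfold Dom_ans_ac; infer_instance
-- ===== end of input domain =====

-- B replaces A's per-character state machine by a two-pointer scan that jumps over whole
-- maximal alternating a/h segments (objective: alternative algorithm, same O(n) cost).

-- ===== PORT A =====
-- one iteration of A's loop body on state (x, y, prev)
def ansStep (s : Int × Int × Char) (c : Char) : Int × Int × Char :=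
  let xp : Int × Char :=
    if c = 'a' ∨ c = 'h' then
      (if c ≠ s.2.2 then s.1 + 1 else 1, c)
    else (0, 'z')
  (xp.1, if xp.1 > s.2.1 then xp.1 else s.2.1, xp.2)

def ans_ac (laugh : String) : Int :=
  (laugh.toList.foldl ansStep (0, 0, 'z')).2.1

-- ===== PORT B =====
-- inner while loop: number of chars of l that continue an alternating a/h run whose
-- last char is c, together with the unconsumed suffix
def altCont (c : Char) : List Char → Int × List Char
  | [] => (0, [])
  | d :: r =>
    if (d = 'a' ∨ d = 'h') ∧ d ≠ c then
      let p := altCont d r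
      (p.1 + 1, p.2)
    else (0, d :: r)

theorem altCont_len (c : Char) (l : List Char) : (altCont c l).2.length ≤ l.length := by
  induction l generalizing c with
  | nil => simp [altCont]
  | cons d r ih =>
    simp only [altCont]
    split
    · exact le_trans (ih d) (Nat.le_succ _)
    · simp

-- outer while loop: skip non-a/h chars; at an a/h char measure the whole segment,
-- update best, and resume after the segment
def altGo : List Char → Int → Int
  | [], best => best
  | c :: r, best =>
    if c = 'a' ∨ c = 'h' then
      let p := altCont c r
      altGo p.2 (if p.1 + 1 > best then p.1 + 1 else best)
    else altGo r best
termination_by l _ => l.length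
decreasing_by
  · exact Nat.lt_succ_of_le (altCont_len c r)
  · simp

def ans_ac_alt (laugh : String) : Int :=
  altGo laugh.toList 0

-- ===== PRECONDITION & SPEC =====
def Spec_ans_ac (laugh : String) (out : Int) : Prop := out = ans_ac_alt laugh
instance (laugh : String) (out : Int) : Decidable (Spec_ans_ac laugh out) := by unfold Spec_ans_ac; infer_instance

-- ===== CLAIM (what is proved, stated in full; the proofs are below) =====
def Claim_equal_ans_ac : Prop := ∀ (laugh : String), Dom_ans_ac laugh → Spec_ans_ac laugh (ans_ac laugh)

-- ===== LEMMAS AND PROOFS =====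

theorem altCont_nonneg (c : Char) (l : List Char) : 0 ≤ (altCont c l).1 := by
  induction l generalizing c with
  | nil => simp [altCont]
  | cons d r ih =>
    simp only [altCont]
    split
    · have := ih d; omega
    · simp

-- mid-run invariant: from a state inside an alternating run, A's fold finishes the run
-- and then behaves like a fresh fold on the unconsumed suffix
theorem midrun (l : List Char) : ∀ (c : Char) (x y : Int), (c = 'a' ∨ c = 'h') → 1 ≤ x → x ≤ y →
    (l.foldl ansStep (x, y, c)).2.1
      = ((altCont c l).2.foldl ansStep (0, max y (x + (altCont c l).1), 'z')).2.1 := by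
  induction l with
  | nil =>
    intro c x y _ _ hxy
    simp only [altCont, List.foldl]
    omega
  | cons d r ih =>
    intro c x y hc hx hxy
    by_cases hd : (d = 'a' ∨ d = 'h') ∧ d ≠ c
    · -- run continues
      have hstep : ansStep (x, y, c) d = (x + 1, max y (x + 1), d) := by
        simp only [ansStep, if_pos hd.1, if_pos hd.2]
        have h : (if x + 1 > y then x + 1 else y) = max y (x + 1) := by omega
        rw [h]
      have hk := altCont_nonneg d r
      have := ih d (x + 1) (max y (x + 1)) hd.1 (by omega) (le_max_right _ _)
      simp only [altCont, if_pos hd, List.foldl, hstep, this]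
      have hmax : max (max y (x + 1)) (x + 1 + (altCont d r).1)
          = max y (x + ((altCont d r).1 + 1)) := by omega
      rw [hmax]
    · -- run breaks here: the state behaves like the fresh state
      have hy1 : 1 ≤ y := le_trans hx hxy
      have hstep : ansStep (x, y, c) d = ansStep (0, y, 'z') d := by
        by_cases hah : d = 'a' ∨ d = 'h'
        · have hdc : d = c := by
            by_contra h; exact hd ⟨hah, h⟩
          have hdz : d ≠ 'z' := by
            rcases hah with h | h <;> simp [h]
          subst hdc
          simp only [ansStep, if_pos hah, if_neg (by simp : ¬ d ≠ d), if_pos (by simp [hdz] : d ≠ 'z')]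
          have h1 : (if 1 > y then (1:Int) else y) = y := by omega
          have h2 : (if (0:Int) + 1 > y then (0:Int)+1 else y) = y := by omega
          rw [h1, h2]
          norm_num
        · simp only [ansStep, if_neg hah]
      have hmy : max y (x + 0) = y := by omega
      simp only [altCont, if_neg hd, List.foldl, hstep, hmy]

-- main loop correspondence: A's fold from a fresh state equals B's segment scan
theorem main_loop : ∀ (n : ℕ) (l : List Char) (y : Int), l.length ≤ n → 0 ≤ y →
    (l.foldl ansStep (0, y, 'z')).2.1 = altGo l y := by
  intro n
  induction n with
  | zero =>
    intro l y hl _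
    have : l = [] := List.eq_nil_of_length_eq_zero (Nat.le_zero.mp hl)
    subst this
    simp [altGo]
  | succ m ih =>
    intro l y hl hy
    cases l with
    | nil => simp [altGo]
    | cons c r =>
      by_cases hc : c = 'a' ∨ c = 'h'
      · have hcz : c ≠ 'z' := by rcases hc with h | h <;> simp [h]
        have hstep : ansStep (0, y, 'z') c = (1, max y 1, c) := by
          simp only [ansStep, if_pos hc, if_pos hcz]
          have : (if (0:Int) + 1 > y then (0:Int) + 1 else y) = max y 1 := by omega
          rw [this]; norm_num
        have hk := altCont_nonneg c r
        have hlen := altCont_len c r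
        have hmid := midrun r c 1 (max y 1) hc le_rfl (le_max_right _ _)
        have hih := ih (altCont c r).2 (max (max y 1) (1 + (altCont c r).1))
          (by simp at hl; omega) (by omega)
        simp only [List.foldl, hstep]
        rw [hmid, hih]
        simp only [altGo, if_pos hc]
        have : max (max y 1) (1 + (altCont c r).1)
            = (if (altCont c r).1 + 1 > y then (altCont c r).1 + 1 else y) := by omega
        rw [this]
      · have hstep : ansStep (0, y, 'z') c = (0, y, 'z') := by
          simp only [ansStep, if_neg hc]
          have : (if (0:Int) > y then (0:Int) else y) = y := by omega
          simp [this]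
        simp only [List.foldl, hstep, altGo, if_neg hc]
        exact ih r y (by simp at hl; omega) hy

-- ===== VERDICT (by name: the statement is the Claim_ definition above) =====
theorem ans_ac_spec : Claim_equal_ans_ac := by
  intro laugh _
  unfold Spec_ans_ac ans_ac ans_ac_alt
  exact main_loop laugh.toList.length laugh.toList 0 le_rfl le_rfl
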